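-- pv_equiv track=rewrite | github.com/OctoberThe8/LHDiff | src/gui_output.py | classifyLines
-- ===== SOURCE A (Python) =====
-- from typing import List, Dict
--
-- def classifyLines(
--     leftLines: List[str],
--     rightLines: List[str],
--     mapping: Dict[int, List[int]],
-- ):
--
--     numberLeft = len(leftLines)
--     numberRight = len(rightLines)
--
--     leftStatus = ["deleted"] * numberLeft
--     rightStatus = ["added"] * numberRight
--
--     #build reverse mapping: which left lines point to each right line
--     rightToLeft: Dict[int, List[int]] = {}
--     for lineIndex, r_list in mapping.items():
--         if not r_list:
--             continue
--         if len(r_list) == 1: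
--             leftStatus[lineIndex] = "same"
--         else:
--             leftStatus[lineIndex] = "split"
--
--         for r_idx in r_list:
--             rightToLeft.setdefault(r_idx, []).append(lineIndex)
--
--     #classify right side
--     for r_idx in range(numberRight):
--         if r_idx not in rightToLeft:
--             rightStatus[r_idx] = "added"
--             continue
--
--         ls = rightToLeft[r_idx]
--         #if any of its left lines is a split mapping, mark as split
--         split_here = any(
--             len(mapping[l]) > 1
--             for l in ls
--             if l in mapping
--         )
--         if split_here:
--             rightStatus[r_idx] = "split"
--         else:
--             rightStatus[r_idx] = "same"
--     return leftStatus, rightStatus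
-- ===== SOURCE B (Python) =====
-- from typing import List, Dict
--
-- def classifyLines(
--     leftLines: List[str],
--     rightLines: List[str],
--     mapping: Dict[int, List[int]],
-- ):
--     leftStatus = ["deleted"] * len(leftLines)
--     rightStatus = ["added"] * len(rightLines)
--     numberRight = len(rightLines)
--
--     # single pass: classify the left line and push its status to the right
--     # lines it maps to; "split" wins over "same", defaults stay otherwise
--     for lineIndex, r_list in mapping.items():
--         if not r_list:
--             continue
--         leftStatus[lineIndex] = "same" if len(r_list) == 1 else "split"
--         for r_idx in r_list:
--             if 0 <= r_idx < numberRight: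
--                 if len(r_list) > 1:
--                     rightStatus[r_idx] = "split"
--                 elif rightStatus[r_idx] != "split":
--                     rightStatus[r_idx] = "same"
--     return leftStatus, rightStatus
-- ===== Notes on version B (the rewrite author's own statement) =====
-- stated objective: simpler
-- what changed: B classifies both sides in one pass over mapping.items(), pushing 'split'/'same' directly onto the right-line statuses ('split' wins), instead of A's building of a rightToLeft reverse map followed by a second scan over all right lines that re-examines each contributing left line's mapping.
import Mathlib
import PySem

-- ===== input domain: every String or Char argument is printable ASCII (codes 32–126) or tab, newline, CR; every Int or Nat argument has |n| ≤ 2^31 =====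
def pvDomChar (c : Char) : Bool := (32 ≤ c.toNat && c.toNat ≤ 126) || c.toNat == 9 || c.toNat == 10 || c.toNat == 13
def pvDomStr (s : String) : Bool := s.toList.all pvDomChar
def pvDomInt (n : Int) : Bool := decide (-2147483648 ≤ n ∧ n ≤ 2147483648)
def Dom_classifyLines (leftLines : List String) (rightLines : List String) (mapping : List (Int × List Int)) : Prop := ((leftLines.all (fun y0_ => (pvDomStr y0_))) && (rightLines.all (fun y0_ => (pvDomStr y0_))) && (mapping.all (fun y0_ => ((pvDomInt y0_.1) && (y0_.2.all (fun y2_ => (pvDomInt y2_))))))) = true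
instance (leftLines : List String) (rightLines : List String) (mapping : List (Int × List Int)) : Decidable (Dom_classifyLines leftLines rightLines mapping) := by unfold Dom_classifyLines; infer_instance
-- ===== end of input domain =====

-- B replaces A's reverse map (rightToLeft) + second scan over the right lines by a single pass
-- over mapping.items() that pushes "split"/"same" directly onto the right statuses ("split" wins).
-- Return-value equivalence only; neither program mutates its arguments.

-- ===== PORT A =====
-- one mapping item: set the left status, extend the reverse map rightToLeft
def pvStepA (st : List String × PySem.Dict Int (List Int)) (p : Int × List Int) :
    List String × PySem.Dict Int (List Int) :=
  if p.2 = [] then st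
  else
    ((if p.2.length = 1 then PySem.List.pySetD st.1 p.1 "same"
      else PySem.List.pySetD st.1 p.1 "split"),
     p.2.foldl (fun d r => d.modify r [] (fun ls => ls ++ [p.1])) st.2)

def classifyLines (leftLines : List String) (rightLines : List String) (mapping : List (Int × List Int)) : List String × List String :=
  let m := PySem.Dict.ofList mapping
  let st := m.items.foldl pvStepA
      (List.replicate leftLines.length "deleted", PySem.Dict.empty)
  let rightStatus := (PySem.List.pyRange 0 (rightLines.length : Int) 1).foldl
      (fun rs r =>
        if st.2.contains r = false then PySem.List.pySetD rs r "added"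
        else
          -- 'l in mapping' guards the lookup, so getD is exact (no KeyError reachable)
          if (st.2.getD r []).any (fun l => m.contains l && decide (1 < (m.getD l []).length))
          then PySem.List.pySetD rs r "split"
          else PySem.List.pySetD rs r "same")
      (List.replicate rightLines.length "added")
  (st.1, rightStatus)

-- ===== PORT B =====
-- one mapping item: set the left status and push the status onto in-range right lines
def pvStepB (n : Nat) (st : List String × List String) (p : Int × List Int) :
    List String × List String :=
  if p.2 = [] then st
  else
    (PySem.List.pySetD st.1 p.1 (if p.2.length = 1 then "same" else "split"),
     p.2.foldl (fun rs r =>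
        if 0 ≤ r ∧ r < (n : Int) then
          if 1 < p.2.length then PySem.List.pySetD rs r "split"
          else if PySem.List.pyGetD rs r "" ≠ "split" then PySem.List.pySetD rs r "same"
          else rs
        else rs) st.2)

def classifyLines_alt (leftLines : List String) (rightLines : List String) (mapping : List (Int × List Int)) : List String × List String :=
  let st := (PySem.Dict.ofList mapping).items.foldl (pvStepB rightLines.length)
      (List.replicate leftLines.length "deleted",
       List.replicate rightLines.length "added")
  (st.1, st.2)

-- ===== PRECONDITION & SPEC =====
-- Pre_ excludes exactly the inputs where Python A raises IndexError: a mapping entry with a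
-- nonempty target list whose key is outside [-len(leftLines), len(leftLines)).
def Pre_classifyLines (leftLines : List String) (rightLines : List String) (mapping : List (Int × List Int)) : Prop :=
  ∀ p ∈ (PySem.Dict.ofList mapping).items, p.2 ≠ [] → PySem.Raise.InRange leftLines.length p.1
instance (leftLines : List String) (rightLines : List String) (mapping : List (Int × List Int)) : Decidable (Pre_classifyLines leftLines rightLines mapping) := by unfold Pre_classifyLines PySem.Raise.InRange; infer_instance
def pvWitness_classifyLines : List String × List String × (List (Int × List Int)) :=
  (["a", "b"], ["c", "d"], [(0, [0, 1]), (1, [1])])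
def Spec_classifyLines (leftLines : List String) (rightLines : List String) (mapping : List (Int × List Int)) (out : List String × List String) : Prop := out = classifyLines_alt leftLines rightLines mapping
instance (leftLines : List String) (rightLines : List String) (mapping : List (Int × List Int)) (out : List String × List String) : Decidable (Spec_classifyLines leftLines rightLines mapping out) := by unfold Spec_classifyLines; infer_instance

-- ===== CLAIM (what is proved, stated in full; the proofs are below) =====
def Claim_equal_classifyLines : Prop := ∀ (leftLines : List String) (rightLines : List String) (mapping : List (Int × List Int)), Dom_classifyLines leftLines rightLines mapping → Pre_classifyLines leftLines rightLines mapping → Spec_classifyLines leftLines rightLines mapping (classifyLines leftLines rightLines mapping)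

-- ===== LEMMAS AND PROOFS =====

-- the two per-item steps update the left-status component identically
theorem pv_left_eq (L : List (Int × List Int)) (n : Nat) :
    ∀ (ls : List String) (d : PySem.Dict Int (List Int)) (rs : List String),
    (L.foldl pvStepA (ls, d)).1 = (L.foldl (pvStepB n) (ls, rs)).1 := by
  induction L with
  | nil => intro ls d rs; rfl
  | cons p t ih =>
      intro ls d rs
      simp only [List.foldl_cons, pvStepA, pvStepB]
      by_cases hp : p.2 = []
      · rw [if_pos hp, if_pos hp]
        exact ih ls d rs
      · rw [if_neg hp, if_neg hp,
            apply_ite (fun v => PySem.List.pySetD ls p.1 v)]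
        exact ih _ _ _

-- A's fold, right component: only the reverse-map updates matter
def pvDStep (d : PySem.Dict Int (List Int)) (p : Int × List Int) : PySem.Dict Int (List Int) :=
  if p.2 = [] then d else p.2.foldl (fun d r => d.modify r [] (fun ls => ls ++ [p.1])) d

theorem pv_A_snd (L : List (Int × List Int)) :
    ∀ ls d, (L.foldl pvStepA (ls, d)).2 = L.foldl pvDStep d := by
  induction L with
  | nil => intro ls d; rfl
  | cons p t ih =>
      intro ls d
      simp only [List.foldl_cons, pvStepA, pvDStep]
      by_cases hp : p.2 = [] <;> simp [hp, ih]

-- B's fold, right component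
def pvRStep (n : Nat) (rs : List String) (p : Int × List Int) : List String :=
  if p.2 = [] then rs
  else p.2.foldl (fun rs r =>
      if 0 ≤ r ∧ r < (n : Int) then
        if 1 < p.2.length then PySem.List.pySetD rs r "split"
        else if PySem.List.pyGetD rs r "" ≠ "split" then PySem.List.pySetD rs r "same"
        else rs
      else rs) rs

theorem pv_B_snd (n : Nat) (L : List (Int × List Int)) :
    ∀ ls rs, (L.foldl (pvStepB n) (ls, rs)).2 = L.foldl (pvRStep n) rs := by
  induction L with
  | nil => intro ls rs; rfl
  | cons p t ih =>
      intro ls rs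
      simp only [List.foldl_cons, pvStepB, pvRStep]
      by_cases hp : p.2 = [] <;> simp [hp, ih]

-- membership in the reverse map after one item's inner loop
theorem pv_rtl_inner_mem (k : Int) (rl : List Int) :
    ∀ (d : PySem.Dict Int (List Int)) (j : Int) (x : Int),
    (x ∈ (rl.foldl (fun d r => d.modify r [] (fun ls => ls ++ [k])) d).getD j []) ↔
      (x ∈ d.getD j [] ∨ (j ∈ rl ∧ x = k)) := by
  induction rl with
  | nil => intro d j x; simp
  | cons r t ih =>
      intro d j x
      simp only [List.foldl_cons]
      rw [ih]
      rw [PySem.Dict.getD_modify]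
      by_cases hj : j = r
      · subst hj; simp
        tauto
      · simp [hj]

theorem pv_rtl_inner_contains (k : Int) (rl : List Int) :
    ∀ (d : PySem.Dict Int (List Int)) (j : Int),
    (rl.foldl (fun d r => d.modify r [] (fun ls => ls ++ [k])) d).contains j =
      (d.contains j || decide (j ∈ rl)) := by
  induction rl with
  | nil => intro d j; simp
  | cons r t ih =>
      intro d j
      simp only [List.foldl_cons]
      rw [ih, PySem.Dict.contains_modify]
      by_cases hj : j = r
      · subst hj; simp
      · have hb : (j == r) = false := by simp [hj]
        simp [hb, hj]

theorem pv_rtl_mem (L : List (Int × List Int)) :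
    ∀ (d : PySem.Dict Int (List Int)) (j : Int) (x : Int),
    (x ∈ (L.foldl pvDStep d).getD j []) ↔
      (x ∈ d.getD j [] ∨ ∃ p ∈ L, j ∈ p.2 ∧ x = p.1) := by
  induction L with
  | nil => intro d j x; simp
  | cons p t ih =>
      intro d j x
      simp only [List.foldl_cons, pvDStep]
      by_cases hp : p.2 = []
      · simp [hp, ih]
      · rw [if_neg hp, ih, pv_rtl_inner_mem]
        simp; tauto

theorem pv_rtl_contains (L : List (Int × List Int)) :
    ∀ (d : PySem.Dict Int (List Int)) (j : Int),
    ((L.foldl pvDStep d).contains j = true) ↔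
      (d.contains j = true ∨ ∃ p ∈ L, j ∈ p.2) := by
  induction L with
  | nil => intro d j; simp
  | cons p t ih =>
      intro d j
      simp only [List.foldl_cons, pvDStep]
      by_cases hp : p.2 = []
      · simp [hp, ih]
      · rw [if_neg hp, ih, pv_rtl_inner_contains]
        simp; tauto

-- B's inner loop over one item's target list, elementwise
theorem pv_B_inner (n : Nat) (c : Prop) [Decidable c] (rl : List Int) :
    ∀ (rs : List String) (j : Nat), j < n → rs.length = n →
    ((rl.foldl (fun rs r =>
        if 0 ≤ r ∧ r < (n : Int) then
          if c then PySem.List.pySetD rs r "split"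
          else if PySem.List.pyGetD rs r "" ≠ "split" then PySem.List.pySetD rs r "same"
          else rs
        else rs) rs).length = n ∧
     (rl.foldl (fun rs r =>
        if 0 ≤ r ∧ r < (n : Int) then
          if c then PySem.List.pySetD rs r "split"
          else if PySem.List.pyGetD rs r "" ≠ "split" then PySem.List.pySetD rs r "same"
          else rs
        else rs) rs)[j]? =
      (if (j : Int) ∈ rl then
        (if c then some "split"
         else if rs[j]? = some "split" then some "split" else some "same")
       else rs[j]?)) := by
  induction rl with
  | nil => intro rs j hj hlen; simp [hlen]
  | cons r t ih =>
      intro rs j hj hlen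
      simp only [List.foldl_cons]
      have hset : ∀ (v : String) (i : Int), 0 ≤ i → i < (n : Int) →
          (PySem.List.pySetD rs i v).length = n ∧
          (PySem.List.pySetD rs i v)[j]? = (if i = (j : Int) then some v else rs[j]?) := by
        intro v i h0 hn
        rw [PySem.List.pySetD_of_nonneg rs v h0]
        refine ⟨by simp [hlen], ?_⟩
        rw [List.getElem?_set]
        by_cases hij : i = (j : Int)
        · have hn' : i.toNat = j := by omega
          simp [hij, hlen]
          omega
        · have hn' : i.toNat ≠ j := by omega
          simp [hij, hn']
      have hrsval : j < rs.length := by omega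
      by_cases hr : 0 ≤ r ∧ r < (n : Int)
      · by_cases hjr : r = (j : Int)
        · -- this step writes index j
          by_cases hc : c
          · obtain ⟨hl1, hg1⟩ := hset "split" r hr.1 hr.2
            obtain ⟨hl2, hg2⟩ := ih (PySem.List.pySetD rs r "split") j hj hl1
            rw [if_pos hr, if_pos hc]
            refine ⟨hl2, ?_⟩
            rw [hg2, hg1, if_pos hjr]
            by_cases hjt : (j : Int) ∈ t <;> simp [hjt, hjr, hc]
          · -- c is false: value becomes (if rs[j]? = split then split else same)
            by_cases hget : PySem.List.pyGetD rs r "" ≠ "split"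
            · have hnsplit : rs[j]? ≠ some "split" := by
                intro hcon
                apply hget
                rw [hjr, PySem.List.pyGetD_natCast, List.getD_eq_getElem?_getD, hcon]
                rfl
              obtain ⟨hl1, hg1⟩ := hset "same" r hr.1 hr.2
              obtain ⟨hl2, hg2⟩ := ih (PySem.List.pySetD rs r "same") j hj hl1
              rw [if_pos hr, if_neg hc, if_pos hget]
              refine ⟨hl2, ?_⟩
              rw [hg2, hg1, if_pos hjr]
              by_cases hjt : (j : Int) ∈ t <;> simp [hjt, hjr, hc, hnsplit]
            · have hsplit : rs[j]? = some "split" := by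
                rw [not_ne_iff] at hget
                rw [hjr, PySem.List.pyGetD_natCast, List.getD_eq_getElem?_getD,
                    List.getElem?_eq_getElem hrsval] at hget
                simp only [Option.getD_some] at hget
                rw [List.getElem?_eq_getElem hrsval, hget]
              obtain ⟨hl2, hg2⟩ := ih rs j hj hlen
              rw [if_pos hr, if_neg hc, if_neg hget]
              refine ⟨hl2, ?_⟩
              rw [hg2]
              by_cases hjt : (j : Int) ∈ t <;> simp [hjt, hjr, hc, hsplit]
        · -- this step writes a different index: rs[j]? unchanged
          have hjne : ¬ (j : Int) = r := fun h => hjr h.symm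
          by_cases hc : c
          · obtain ⟨hl1, hg1⟩ := hset "split" r hr.1 hr.2
            obtain ⟨hl2, hg2⟩ := ih (PySem.List.pySetD rs r "split") j hj hl1
            rw [if_pos hr, if_pos hc]
            refine ⟨hl2, ?_⟩
            rw [hg2, hg1, if_neg hjr]
            by_cases hjt : (j : Int) ∈ t <;> simp [hjt, hjne, hc]
          · by_cases hget : PySem.List.pyGetD rs r "" ≠ "split"
            · obtain ⟨hl1, hg1⟩ := hset "same" r hr.1 hr.2
              obtain ⟨hl2, hg2⟩ := ih (PySem.List.pySetD rs r "same") j hj hl1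
              rw [if_pos hr, if_neg hc, if_pos hget]
              refine ⟨hl2, ?_⟩
              rw [hg2, hg1, if_neg hjr]
              by_cases hjt : (j : Int) ∈ t <;> simp [hjt, hjne, hc]
            · obtain ⟨hl2, hg2⟩ := ih rs j hj hlen
              rw [if_pos hr, if_neg hc, if_neg hget]
              refine ⟨hl2, ?_⟩
              rw [hg2]
              by_cases hjt : (j : Int) ∈ t <;> simp [hjt, hjne, hc]
      · have hjne : ¬ (j : Int) = r := by
          intro h; exact hr ⟨by omega, by omega⟩
        obtain ⟨hl2, hg2⟩ := ih rs j hj hlen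
        rw [if_neg hr]
        refine ⟨hl2, ?_⟩
        rw [hg2]
        by_cases hjt : (j : Int) ∈ t <;> simp [hjt, hjne]

-- B's whole right-hand fold, elementwise
theorem pv_B_right (n : Nat) (L : List (Int × List Int)) :
    ∀ (rs : List String) (j : Nat), j < n → rs.length = n →
    ((L.foldl (pvRStep n) rs).length = n ∧
     (L.foldl (pvRStep n) rs)[j]? =
      (if ∃ p ∈ L, (j : Int) ∈ p.2 ∧ 1 < p.2.length then some "split"
       else if ∃ p ∈ L, (j : Int) ∈ p.2 then
         (if rs[j]? = some "split" then some "split" else some "same")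
       else rs[j]?)) := by
  induction L with
  | nil => intro rs j hj hlen; simp [hlen]
  | cons p t ih =>
      intro rs j hj hlen
      simp only [List.foldl_cons]
      by_cases hp : p.2 = []
      · have : pvRStep n rs p = rs := by simp [pvRStep, hp]
        rw [this]
        obtain ⟨hl, hg⟩ := ih rs j hj hlen
        refine ⟨hl, ?_⟩
        rw [hg]
        have hiff1 : (∃ q ∈ p :: t, (j : Int) ∈ q.2 ∧ 1 < q.2.length) ↔
            (∃ q ∈ t, (j : Int) ∈ q.2 ∧ 1 < q.2.length) := by
          constructor
          · rintro ⟨q, hq, hmem, hlq⟩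
            rcases List.mem_cons.mp hq with rfl | hq'
            · rw [hp] at hmem; cases hmem
            · exact ⟨q, hq', hmem, hlq⟩
          · rintro ⟨q, hq, hmem, hlq⟩
            exact ⟨q, List.mem_cons_of_mem _ hq, hmem, hlq⟩
        have hiff2 : (∃ q ∈ p :: t, (j : Int) ∈ q.2) ↔ (∃ q ∈ t, (j : Int) ∈ q.2) := by
          constructor
          · rintro ⟨q, hq, hmem⟩
            rcases List.mem_cons.mp hq with rfl | hq'
            · rw [hp] at hmem; cases hmem
            · exact ⟨q, hq', hmem⟩
          · rintro ⟨q, hq, hmem⟩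
            exact ⟨q, List.mem_cons_of_mem _ hq, hmem⟩
        simp only [hiff1, hiff2]
      · have hstep := pv_B_inner n (1 < p.2.length) p.2 rs j hj hlen
        have hrw : pvRStep n rs p = p.2.foldl (fun rs r =>
            if 0 ≤ r ∧ r < (n : Int) then
              if 1 < p.2.length then PySem.List.pySetD rs r "split"
              else if PySem.List.pyGetD rs r "" ≠ "split" then PySem.List.pySetD rs r "same"
              else rs
            else rs) rs := by simp [pvRStep, hp]
        rw [hrw]
        obtain ⟨hl1, hg1⟩ := hstep
        obtain ⟨hl2, hg2⟩ := ih _ j hj hl1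
        refine ⟨hl2, ?_⟩
        rw [hg2, hg1]
        by_cases hPt : ∃ q ∈ t, (j : Int) ∈ q.2 ∧ 1 < q.2.length <;>
        by_cases hQt : ∃ q ∈ t, (j : Int) ∈ q.2 <;>
        by_cases hjp : (j : Int) ∈ p.2 <;>
        by_cases hlp : 1 < p.2.length <;>
          simp [hPt, hQt, hjp, hlp] <;>
          by_cases hrsj : rs[j]? = some "split" <;> simp [hrsj] <;> tauto

theorem pv_rstep_inner_len (n : Nat) (c : Prop) [Decidable c] (rl : List Int) :
    ∀ (rs : List String),
    (rl.foldl (fun rs r =>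
        if 0 ≤ r ∧ r < (n : Int) then
          if c then PySem.List.pySetD rs r "split"
          else if PySem.List.pyGetD rs r "" ≠ "split" then PySem.List.pySetD rs r "same"
          else rs
        else rs) rs).length = rs.length := by
  induction rl with
  | nil => intro rs; rfl
  | cons r t ih =>
      intro rs
      rw [List.foldl_cons, ih]
      split_ifs <;> simp [PySem.List.length_pySetD]

theorem pv_B_right_len (n : Nat) (L : List (Int × List Int)) :
    ∀ (rs : List String), (L.foldl (pvRStep n) rs).length = rs.length := by
  induction L with
  | nil => intro rs; rfl
  | cons p t ih =>
      intro rs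
      rw [List.foldl_cons, ih]
      by_cases hp : p.2 = []
      · simp [pvRStep, hp]
      · simp only [pvRStep, if_neg hp]
        exact pv_rstep_inner_len n _ p.2 rs

-- a fold that sets every index of range(n) once, elementwise
theorem pv_setrange (n : Nat) (g : Int → String) :
    ∀ (rs : List String), n ≤ rs.length → ∀ (j : Nat), j < n →
    (((List.range n).map (fun (k : Nat) => (k : Int))).foldl
        (fun rs r => PySem.List.pySetD rs r (g r)) rs)[j]? = some (g (j : Int)) := by
  induction n with
  | zero => intro rs hlen j hj; omega
  | succ m ih =>
      intro rs hlen j hj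
      rw [List.range_succ, List.map_append, List.foldl_append]
      simp only [List.map_cons, List.map_nil, List.foldl_cons, List.foldl_nil]
      have hlenf : ∀ (K : List Int) (rs : List String),
          (K.foldl (fun rs r => PySem.List.pySetD rs r (g r)) rs).length = rs.length := by
        intro K
        induction K with
        | nil => intro rs; rfl
        | cons a t iht => intro rs; rw [List.foldl_cons, iht, PySem.List.length_pySetD]
      rw [PySem.List.pySetD_natCast, List.getElem?_set]
      by_cases hjm : j < m
      · have hne : m ≠ j := by omega
        rw [if_neg hne]
        exact ih rs (by omega) j hjm
      · have hje : j = m := by omega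
        subst hje
        rw [if_pos rfl, if_pos]
        rw [hlenf]
        omega

theorem pv_replicate_get (n j : Nat) (hj : j < n) (s : String) :
    (List.replicate n s)[j]? = some s := by
  simp [hj]

-- ===== VERDICT (by name: the statement is the Claim_ definition above) =====
theorem classifyLines_spec : Claim_equal_classifyLines := by
  intro leftLines rightLines mapping _ _
  unfold Spec_classifyLines classifyLines classifyLines_alt
  simp only []
  set m := PySem.Dict.ofList mapping with hm
  set n := rightLines.length with hn
  set L := m.items with hL
  set ls0 : List String := List.replicate leftLines.length "deleted" with hls0
  set rs0 : List String := List.replicate n "added" with hrs0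
  refine Prod.ext ?_ ?_
  · exact pv_left_eq L n ls0 PySem.Dict.empty rs0
  · -- right components
    rw [pv_B_snd]
    have hrs0len : rs0.length = n := by simp [hrs0]
    -- A side: rewrite the range fold into a pure set-per-index fold
    set d := L.foldl pvDStep PySem.Dict.empty with hd
    have hdA : (L.foldl pvStepA (ls0, PySem.Dict.empty)).2 = d := pv_A_snd L ls0 PySem.Dict.empty
    rw [hdA]
    set g : Int → String := fun r =>
      if d.contains r = false then "added"
      else if (d.getD r []).any (fun l => m.contains l && decide (1 < (m.getD l []).length))
        then "split" else "same" with hg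
    have hstepg : (fun (rs : List String) (r : Int) =>
        if d.contains r = false then PySem.List.pySetD rs r "added"
        else if (d.getD r []).any (fun l => m.contains l && decide (1 < (m.getD l []).length))
          then PySem.List.pySetD rs r "split"
          else PySem.List.pySetD rs r "same") =
        (fun rs r => PySem.List.pySetD rs r (g r)) := by
      funext rs r
      rw [hg]
      by_cases h1 : d.contains r = false
      · simp [h1]
      · by_cases h2 : ((d.getD r []).any
            (fun l => m.contains l && decide (1 < (m.getD l []).length))) = true
        · simp [h1, h2]
        · simp [h1, h2]
    rw [hstepg]
    rw [hn, PySem.List.pyRange_zero_natCast]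
    -- both sides elementwise
    have hAlen : ∀ (K : List Int) (rs : List String),
        (K.foldl (fun rs r => PySem.List.pySetD rs r (g r)) rs).length = rs.length := by
      intro K
      induction K with
      | nil => intro rs; rfl
      | cons a t iht => intro rs; rw [List.foldl_cons, iht, PySem.List.length_pySetD]
    apply List.ext_getElem?
    intro j
    by_cases hj : j < n
    · rw [pv_setrange n g rs0 (le_of_eq hrs0len.symm) j hj]
      obtain ⟨_, hBg⟩ := pv_B_right n L rs0 j hj hrs0len
      rw [hBg]
      rw [pv_replicate_get n j hj "added"]
      -- identify the conditions
      have hcont : (d.contains (j : Int) = true) ↔ ∃ p ∈ L, (j : Int) ∈ p.2 := by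
        rw [hd, pv_rtl_contains]
        simp
      have hany : ((d.getD (j : Int) []).any
            (fun l => m.contains l && decide (1 < (m.getD l []).length)) = true) ↔
          ∃ p ∈ L, (j : Int) ∈ p.2 ∧ 1 < p.2.length := by
        rw [List.any_eq_true]
        constructor
        · rintro ⟨l, hl, hprop⟩
          rw [hd, pv_rtl_mem] at hl
          simp only [PySem.Dict.getD_empty, List.not_mem_nil, false_or] at hl
          obtain ⟨p, hpL, hjp, hx⟩ := hl
          refine ⟨p, hpL, hjp, ?_⟩
          simp only [Bool.and_eq_true, decide_eq_true_eq] at hprop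
          have : m.getD l [] = p.2 := by
            rw [hx]
            exact PySem.Dict.getD_of_mem_items m (by rw [← hL]; exact hpL)
              (PySem.Dict.nodup_keys_ofList mapping) []
          rw [this] at hprop
          exact hprop.2
        · rintro ⟨p, hpL, hjp, hlen⟩
          refine ⟨p.1, ?_, ?_⟩
          · rw [hd, pv_rtl_mem]
            right
            exact ⟨p, hpL, hjp, rfl⟩
          · have hcm : m.contains p.1 = true := by
              rw [PySem.Dict.contains_iff_mem_keys]
              exact PySem.Dict.mem_keys_of_mem_items m (by rw [← hL]; exact hpL)
            have hgd : m.getD p.1 [] = p.2 := by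
              have : (p.1, p.2) ∈ m.items := by rw [← hL]; exact hpL
              exact PySem.Dict.getD_of_mem_items m this (PySem.Dict.nodup_keys_ofList mapping) []
            simp [hcm, hgd, hlen]
      rw [hg]
      by_cases hQ : ∃ p ∈ L, (j : Int) ∈ p.2
      · have hc : d.contains (j : Int) = true := hcont.mpr hQ
        by_cases hP : ∃ p ∈ L, (j : Int) ∈ p.2 ∧ 1 < p.2.length
        · have ha : ((d.getD (j : Int) []).any
              (fun l => m.contains l && decide (1 < (m.getD l []).length))) = true :=
            hany.mpr hP
          simp [hc, ha, hP, hQ]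
        · have ha : ((d.getD (j : Int) []).any
              (fun l => m.contains l && decide (1 < (m.getD l []).length))) = false := by
            rcases Bool.eq_false_or_eq_true ((d.getD (j : Int) []).any
                (fun l => m.contains l && decide (1 < (m.getD l []).length))) with h | h
            · exact absurd (hany.mp h) hP
            · exact h
          simp [hc, ha, hP, hQ]
      · have hP : ¬ ∃ p ∈ L, (j : Int) ∈ p.2 ∧ 1 < p.2.length := by
          rintro ⟨p, hp, hj2, _⟩
          exact hQ ⟨p, hp, hj2⟩
        have hc : d.contains (j : Int) = false := by
          rcases Bool.eq_false_or_eq_true (d.contains (j : Int)) with h | h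
          · exact absurd (hcont.mp h) hQ
          · exact h
        simp [hc, hP, hQ]
    · -- out of range on both sides: none
      rw [List.getElem?_eq_none (by rw [hAlen, hrs0len]; omega),
          List.getElem?_eq_none (by rw [pv_B_right_len, hrs0len]; omega)]
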